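-- pv_equiv track=rewrite | github.com/Aukciszek/experimental-repo | experimental_repo/random_gbw.py | get_power_2_factors
-- ===== SOURCE A (Python) =====
-- def get_power_2_factors(n):
--     r = 0
--
--     if n <= 0:
--         return 0, 0
--
--     while n % 2 == 0:
--         n = n // 2
--         r += 1
--
--     return r, n
-- ===== SOURCE B (Python) =====
-- def get_power_2_factors(n):
--     if n <= 0:
--         return 0, 0
--     low = n & -n
--     r = low.bit_length() - 1
--     return r, n >> r
-- ===== Notes on version B (the rewrite author's own statement) =====
-- stated objective: idiomatic
-- what changed: Replaces the trailing-division loop with a closed-form bit computation: low = n & -n isolates the lowest set bit, r = low.bit_length()-1 is the power-of-2 exponent, and n >> r is the odd remainder.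
import Mathlib
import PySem

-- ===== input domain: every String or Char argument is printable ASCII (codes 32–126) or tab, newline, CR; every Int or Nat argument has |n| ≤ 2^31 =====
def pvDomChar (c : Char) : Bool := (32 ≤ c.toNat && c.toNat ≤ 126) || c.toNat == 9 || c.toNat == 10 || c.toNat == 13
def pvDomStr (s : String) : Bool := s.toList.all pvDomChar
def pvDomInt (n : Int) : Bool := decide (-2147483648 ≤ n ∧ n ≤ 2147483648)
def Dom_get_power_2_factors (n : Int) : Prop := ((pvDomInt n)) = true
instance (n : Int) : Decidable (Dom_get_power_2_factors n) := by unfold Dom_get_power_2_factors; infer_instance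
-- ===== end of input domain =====

-- B replaces A's trailing-division loop by the closed-form bit trick (n & -n, bit_length); objective: idiomatic.

-- ===== PORT A =====
-- A's while loop: state (n, r); condition n % 2 == 0; body n = n // 2, r += 1.
-- The '0 < n' guard only makes the recursion total (the loop is reached only with n > 0).
def pvLoopA (n r : Int) : Int × Int :=
  if h : 0 < n then
    if PySem.Int.mod n 2 = 0 then pvLoopA (PySem.Int.floordiv n 2) (r + 1) else (r, n)
  else (r, n)
termination_by n.toNat
decreasing_by
  show (Int.fdiv n 2).toNat < n.toNat
  rw [Int.fdiv_eq_ediv]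
  simp
  omega

def get_power_2_factors (n : Int) : Int × Int :=
  if n ≤ 0 then (0, 0) else pvLoopA n 0

-- ===== PORT B =====
def get_power_2_factors_alt (n : Int) : Int × Int :=
  if n ≤ 0 then (0, 0)
  else
    let low := PySem.Int.band n (-n)
    let r : Int := (PySem.Int.bitLength low : Int) - 1
    (r, n >>> r.toNat)

-- ===== PRECONDITION & SPEC =====
def Spec_get_power_2_factors (n : Int) (out : Int × Int) : Prop := out = get_power_2_factors_alt n
instance (n : Int) (out : Int × Int) : Decidable (Spec_get_power_2_factors n out) := by unfold Spec_get_power_2_factors; infer_instance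

-- ===== CLAIM (what is proved, stated in full; the proofs are below) =====
def Claim_equal_get_power_2_factors : Prop := ∀ (n : Int), Dom_get_power_2_factors n → Spec_get_power_2_factors n (get_power_2_factors n)

-- ===== LEMMAS AND PROOFS =====

-- lowest set bit of a positive natural, written as B's Lean port computes it
def pvLowbit (m : Nat) : Nat := m - (m &&& (m - 1))

theorem pv_and_pred_odd (m : Nat) (h : m % 2 = 1) : m &&& (m - 1) = m - 1 := by
  apply Nat.eq_of_testBit_eq
  intro i
  rw [Nat.testBit_and]
  cases i with
  | zero =>
      rw [Nat.testBit_zero, Nat.testBit_zero]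
      have h1 : (m - 1) % 2 = 0 := by omega
      simp [h1]
  | succ i =>
      rw [Nat.testBit_succ, Nat.testBit_succ]
      have h2 : m / 2 = (m - 1) / 2 := by omega
      rw [h2, Bool.and_self]

theorem pv_and_pred_even (m : Nat) (h : m % 2 = 0) (h0 : 0 < m) :
    m &&& (m - 1) = 2 * ((m / 2) &&& (m / 2 - 1)) := by
  apply Nat.eq_of_testBit_eq
  intro i
  rw [Nat.testBit_and]
  cases i with
  | zero =>
      rw [Nat.testBit_zero, Nat.testBit_zero]
      have h1 : m % 2 = 0 := h
      have h2 : (2 * (m / 2 &&& (m / 2 - 1))) % 2 = 0 := by omega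
      simp [h1, h2]
  | succ i =>
      rw [Nat.testBit_succ, Nat.testBit_succ, Nat.testBit_succ]
      have h2 : (m - 1) / 2 = m / 2 - 1 := by omega
      have h3 : 2 * (m / 2 &&& (m / 2 - 1)) / 2 = m / 2 &&& (m / 2 - 1) := by omega
      rw [h2, h3, Nat.testBit_and]

theorem pvLowbit_odd (m : Nat) (h : m % 2 = 1) : pvLowbit m = 1 := by
  unfold pvLowbit
  rw [pv_and_pred_odd m h]
  omega

theorem pvLowbit_even (m : Nat) (h : m % 2 = 0) (h0 : 0 < m) :
    pvLowbit m = 2 * pvLowbit (m / 2) := by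
  unfold pvLowbit
  rw [pv_and_pred_even m h h0]
  have h1 : m / 2 &&& (m / 2 - 1) ≤ m / 2 := Nat.and_le_left
  omega

theorem pvLowbit_pos (m : Nat) (h0 : 0 < m) : 0 < pvLowbit m := by
  induction m using Nat.strong_induction_on with
  | _ m ih =>
    rcases Nat.even_or_odd m with he | ho
    · have h : m % 2 = 0 := Nat.even_iff.mp he
      rw [pvLowbit_even m h h0]
      have := ih (m / 2) (by omega) (by omega)
      omega
    · rw [pvLowbit_odd m (Nat.odd_iff.mp ho)]; omega

theorem pvBL_pos (m : Nat) (h0 : 0 < m) : 0 < PySem.Int.bitLength (m : Int) := by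
  rw [PySem.Int.bitLength_natCast h0]
  omega

-- the loop computes exactly B's closed form
theorem pvLoopA_eq (m : Nat) (h0 : 0 < m) :
    ∀ r : Int, pvLoopA (m : Int) r =
      (r + ((PySem.Int.bitLength ((pvLowbit m : Nat) : Int) : Int) - 1),
       ((m >>> (PySem.Int.bitLength ((pvLowbit m : Nat) : Int) - 1) : Nat) : Int)) := by
  induction m using Nat.strong_induction_on with
  | _ m ih =>
    intro r
    rw [pvLoopA]
    have hpos : 0 < (m : Int) := by exact_mod_cast h0
    rw [dif_pos hpos]
    have hmod : PySem.Int.mod (m : Int) 2 = ((m % 2 : Nat) : Int) := by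
      show Int.fmod (m : Int) 2 = ((m % 2 : Nat) : Int)
      rw [Int.fmod_eq_emod]
      simp
    rcases Nat.even_or_odd m with he | ho
    · -- even: recurse
      have h : m % 2 = 0 := Nat.even_iff.mp he
      have hc : PySem.Int.mod (m : Int) 2 = 0 := by rw [hmod, h]; rfl
      rw [if_pos hc]
      have hdiv : PySem.Int.floordiv (m : Int) 2 = ((m / 2 : Nat) : Int) := by
        show Int.fdiv (m : Int) 2 = ((m / 2 : Nat) : Int)
        rw [Int.fdiv_eq_ediv]
        simp
      rw [hdiv, ih (m / 2) (by omega) (by omega)]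
      have hL : pvLowbit m = 2 * pvLowbit (m / 2) := pvLowbit_even m h h0
      have hLp : 0 < pvLowbit (m / 2) := pvLowbit_pos _ (by omega)
      have hBL : PySem.Int.bitLength ((pvLowbit m : Nat) : Int)
          = PySem.Int.bitLength ((pvLowbit (m / 2) : Nat) : Int) + 1 := by
        rw [hL, PySem.Int.bitLength_natCast (by omega)]
        congr 2
        omega
      have hBLp : 0 < PySem.Int.bitLength ((pvLowbit (m / 2) : Nat) : Int) :=
        pvBL_pos _ hLp
      rw [hBL]
      set t := PySem.Int.bitLength ((pvLowbit (m / 2) : Nat) : Int) with ht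
      have hshift : m >>> (t + 1 - 1) = (m / 2) >>> (t - 1) := by
        obtain ⟨s, hs⟩ : ∃ s, t = s + 1 := ⟨t - 1, by omega⟩
        rw [hs]
        simp only [Nat.add_sub_cancel]
        rw [Nat.shiftRight_eq_div_pow, Nat.shiftRight_eq_div_pow,
          pow_succ', Nat.div_div_eq_div_mul]
      rw [hshift]
      simp only [Prod.mk.injEq]
      refine ⟨by push_cast; omega, trivial⟩
    · -- odd: stop
      have h : m % 2 = 1 := Nat.odd_iff.mp ho
      have hc : ¬ PySem.Int.mod (m : Int) 2 = 0 := by rw [hmod, h]; decide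
      rw [if_neg hc, pvLowbit_odd m h]
      have hb1 : PySem.Int.bitLength ((1 : Nat) : Int) = 1 := by decide
      rw [hb1]
      simp

-- evaluating B's port on a positive integer
theorem pv_band_pos (n : Int) (h : 0 < n) :
    PySem.Int.band n (-n) = ((pvLowbit n.toNat : Nat) : Int) := by
  unfold PySem.Int.band
  rw [if_pos (by omega), if_neg (by omega)]
  have h1 : (- -n - 1).toNat = n.toNat - 1 := by omega
  unfold pvLowbit
  rw [h1]

-- ===== VERDICT (by name: the statement is the Claim_ definition above) =====
theorem get_power_2_factors_spec : Claim_equal_get_power_2_factors := by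
  intro n _
  unfold Spec_get_power_2_factors get_power_2_factors get_power_2_factors_alt
  by_cases hn : n ≤ 0
  · rw [if_pos hn, if_pos hn]
  · rw [if_neg hn, if_neg hn]
    have hpos : 0 < n := by omega
    have hm : 0 < n.toNat := by omega
    have hn' : n = ((n.toNat : Nat) : Int) := by omega
    simp only [pv_band_pos n hpos]
    have hLp : 0 < pvLowbit n.toNat := pvLowbit_pos _ hm
    have hBLp : 0 < PySem.Int.bitLength ((pvLowbit n.toNat : Nat) : Int) :=
      pvBL_pos _ hLp
    have h1 : ((PySem.Int.bitLength ((pvLowbit n.toNat : Nat) : Int) : Int) - 1).toNat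
        = PySem.Int.bitLength ((pvLowbit n.toNat : Nat) : Int) - 1 := by omega
    rw [h1]
    conv_lhs => rw [hn']
    rw [pvLoopA_eq n.toNat hm 0]
    simp only [Prod.mk.injEq]
    constructor
    · omega
    · conv_rhs => rw [hn']
      rfl
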